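-- pv_equiv track=rewrite | github.com/GauriGhosalkar/MedX-Project | backend/app.py | extract_medicine_name
-- ===== SOURCE A (Python) =====
-- def extract_medicine_name(texts):
--     blacklist = [
--         "TABLET","CAPSULE","BATCH","EXP","MFG",
--         "PHARMA","MG","ML","KEEP","STORE"
--     ]
--
--     candidates = []
--     for t in texts:
--         t = t.upper().strip()
--         if len(t) < 5:
--             continue
--         if any(b in t for b in blacklist):
--             continue
--         if t.isalpha():
--             candidates.append(t)
--
--     return max(candidates, key=len) if candidates else "Unknown"
-- ===== SOURCE B (Python) =====
-- def extract_medicine_name(texts):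
--     blacklist = [
--         "TABLET","CAPSULE","BATCH","EXP","MFG",
--         "PHARMA","MG","ML","KEEP","STORE"
--     ]
--     best = None
--     for t in texts:
--         c = t.upper().strip()
--         if len(c) < 5:
--             continue
--         if any(b in c for b in blacklist):
--             continue
--         if c.isalpha():
--             if best is None:
--                 best = c
--             elif len(best) < len(c):
--                 best = c
--     return best if best is not None else "Unknown"
-- ===== Notes on version B (the rewrite author's own statement) =====
-- stated objective: simpler
-- what changed: Fuses the candidate-list construction and the max(key=len) pass into a single loop over texts maintaining a running best (Option), with strict > so the first longest candidate wins, and no intermediate list is built.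
import Mathlib
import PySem

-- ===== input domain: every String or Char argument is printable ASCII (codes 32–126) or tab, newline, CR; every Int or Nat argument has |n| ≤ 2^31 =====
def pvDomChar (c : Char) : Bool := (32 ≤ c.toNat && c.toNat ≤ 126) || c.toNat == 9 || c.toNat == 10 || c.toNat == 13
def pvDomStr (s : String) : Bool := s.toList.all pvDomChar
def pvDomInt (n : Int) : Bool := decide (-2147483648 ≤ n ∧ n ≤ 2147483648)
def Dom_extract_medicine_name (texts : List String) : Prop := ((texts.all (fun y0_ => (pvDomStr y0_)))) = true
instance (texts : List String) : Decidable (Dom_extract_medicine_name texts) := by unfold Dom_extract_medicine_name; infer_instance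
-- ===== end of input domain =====

-- B fuses A's two passes (build candidate list, then max(key=len)) into one loop with a running Option best; simpler, same cost.

-- ===== PORT A =====
def pvBlacklist : List String :=
  ["TABLET", "CAPSULE", "BATCH", "EXP", "MFG", "PHARMA", "MG", "ML", "KEEP", "STORE"]

-- one iteration of A's candidate-collecting loop (the Python loop body)
def pvStepA (acc : List String) (t : String) : List String :=
  let t := PySem.Str.strip (PySem.Str.upper t)
  if PySem.Str.len t < 5 then acc
  else if pvBlacklist.any (fun b => PySem.Str.isIn b t) then acc
  else if PySem.Str.strIsalpha t then acc ++ [t]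
  else acc

def extract_medicine_name (texts : List String) : String :=
  let candidates : List String := texts.foldl pvStepA []
  match PySem.List.max? candidates PySem.Str.len with
  | some m => m
  | none => "Unknown"

-- ===== PORT B =====
-- one iteration of B's single fused loop (the Python loop body)
def pvStepB (best : Option String) (t : String) : Option String :=
  let c := PySem.Str.strip (PySem.Str.upper t)
  if PySem.Str.len c < 5 then best
  else if pvBlacklist.any (fun b => PySem.Str.isIn b c) then best
  else if PySem.Str.strIsalpha c then
    match best with
    | none => some c
    | some m => if PySem.Str.len m < PySem.Str.len c then some c else best
  else best

def extract_medicine_name_alt (texts : List String) : String :=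
  match texts.foldl pvStepB none with
  | some m => m
  | none => "Unknown"

-- ===== PRECONDITION & SPEC =====
def Spec_extract_medicine_name (texts : List String) (out : String) : Prop := out = extract_medicine_name_alt texts
instance (texts : List String) (out : String) : Decidable (Spec_extract_medicine_name texts out) := by unfold Spec_extract_medicine_name; infer_instance

-- ===== CLAIM (what is proved, stated in full; the proofs are below) =====
def Claim_equal_extract_medicine_name : Prop := ∀ (texts : List String), Dom_extract_medicine_name texts → Spec_extract_medicine_name texts (extract_medicine_name texts)

-- ===== LEMMAS AND PROOFS =====

-- normalized candidate contribution of one text: [c] if it survives A's filters, else []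
def pvPick (t : String) : List String :=
  let c := PySem.Str.strip (PySem.Str.upper t)
  if PySem.Str.len c < 5 then []
  else if pvBlacklist.any (fun b => PySem.Str.isIn b c) then []
  else if PySem.Str.strIsalpha c then [c]
  else []

def pvMaxStep (b : Option String) (c : String) : Option String :=
  match b with
  | none => some c
  | some m => if PySem.Str.len m < PySem.Str.len c then some c else some m

lemma pvStepA_eq (acc : List String) (t : String) : pvStepA acc t = acc ++ pvPick t := by
  unfold pvStepA pvPick
  generalize PySem.Str.strip (PySem.Str.upper t) = c
  dsimp only
  split_ifs <;> simp

lemma pvStepB_eq (b : Option String) (t : String) :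
    pvStepB b t = (pvPick t).foldl pvMaxStep b := by
  unfold pvStepB pvPick
  generalize PySem.Str.strip (PySem.Str.upper t) = c
  dsimp only
  split_ifs <;> cases b <;> rfl

lemma pvCandidates_eq (texts : List String) (acc : List String) :
    texts.foldl pvStepA acc = acc ++ texts.flatMap pvPick := by
  induction texts generalizing acc with
  | nil => simp
  | cons t ts ih => rw [List.foldl_cons, List.flatMap_cons, ih, pvStepA_eq, List.append_assoc]

lemma pvBfold_eq (texts : List String) (b : Option String) :
    texts.foldl pvStepB b = (texts.flatMap pvPick).foldl pvMaxStep b := by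
  induction texts generalizing b with
  | nil => simp
  | cons t ts ih => rw [List.foldl_cons, ih, pvStepB_eq, List.flatMap_cons, List.foldl_append]

lemma pvMax?_eq_foldl (xs : List String) :
    PySem.List.max? xs PySem.Str.len = xs.foldl pvMaxStep none := by
  unfold PySem.List.max?
  apply PySem.List.foldl_congr_mem
  intro acc x _
  cases acc <;> rfl

-- ===== VERDICT (by name: the statement is the Claim_ definition above) =====
theorem extract_medicine_name_spec : Claim_equal_extract_medicine_name := by
  intro texts _
  unfold Spec_extract_medicine_name extract_medicine_name extract_medicine_name_alt
  rw [pvCandidates_eq, List.nil_append, pvBfold_eq]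
  generalize texts.flatMap pvPick = xs
  dsimp only
  rw [pvMax?_eq_foldl]
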